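-- pv_equiv track=rewrite | github.com/Norrawichz/Competitive-programming | .vscode/py/c2.py | calculate_structure_cost
-- ===== SOURCE A (Python) =====
-- def calculate_structure_cost(N, M, K, C, strengths, earthquakes):
--     destroyed_each_round = []
--     for quake in earthquakes:
--         destroyed = 0
--         for i in range(N):
--             if strengths[i] <= 0:
--                 continue  # Already destroyed
--             if quake > strengths[i]:
--                 strengths[i] = 0
--                 destroyed += 1
--             else:
--                 strengths[i] -= K
--                 if strengths[i] <= 0:
--                     strengths[i] = 0
--         destroyed_each_round.append(destroyed)
--
--     # Find LIS (Longest Increasing Subsequence)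
--     def LIS(arr):
--         import bisect
--         lis = []
--         for num in arr:
--             idx = bisect.bisect_right(lis, num)
--             if idx == len(lis):
--                 lis.append(num)
--             else:
--                 lis[idx] = num
--         return len(lis)
--
--     decay = LIS(destroyed_each_round)
--     return decay * C
-- ===== SOURCE B (Python) =====
-- import bisect
--
--
-- def find_hit_round(K, s, earthquakes):
--     # first round index j whose quake would exceed the (un-clamped) residual
--     # strength s - K*j, i.e. earthquakes[j] + K*j > s
--     for j, q in enumerate(earthquakes):
--         if q + K * j > s:
--             return j
--     return None
--
--
-- def calculate_structure_cost(N, M, K, C, strengths, earthquakes):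
--     counts = [0] * len(earthquakes)
--     for s in strengths[:max(N, 0)]:
--         if s <= 0:
--             continue
--         j = find_hit_round(K, s, earthquakes)
--         if j is not None and s > K * j:
--             counts[j] += 1
--     lis = []
--     for num in counts:
--         idx = bisect.bisect_right(lis, num)
--         if idx == len(lis):
--             lis.append(num)
--         else:
--             lis[idx] = num
--     return len(lis) * C
-- ===== Notes on version B (the rewrite author's own statement) =====
-- stated objective: faster
-- what changed: B replaces A's round-by-round mutation of the strengths array (M full passes over N structures) by a per-structure closed form: a structure of strength s is counted in the first round j with quake[j]+K*j>s, and only if s>K*j (otherwise it decayed to 0 first), so each structure is resolved by one early-exiting scan and no array is mutated; the non-decreasing-subsequence step is unchanged.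
import Mathlib
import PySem

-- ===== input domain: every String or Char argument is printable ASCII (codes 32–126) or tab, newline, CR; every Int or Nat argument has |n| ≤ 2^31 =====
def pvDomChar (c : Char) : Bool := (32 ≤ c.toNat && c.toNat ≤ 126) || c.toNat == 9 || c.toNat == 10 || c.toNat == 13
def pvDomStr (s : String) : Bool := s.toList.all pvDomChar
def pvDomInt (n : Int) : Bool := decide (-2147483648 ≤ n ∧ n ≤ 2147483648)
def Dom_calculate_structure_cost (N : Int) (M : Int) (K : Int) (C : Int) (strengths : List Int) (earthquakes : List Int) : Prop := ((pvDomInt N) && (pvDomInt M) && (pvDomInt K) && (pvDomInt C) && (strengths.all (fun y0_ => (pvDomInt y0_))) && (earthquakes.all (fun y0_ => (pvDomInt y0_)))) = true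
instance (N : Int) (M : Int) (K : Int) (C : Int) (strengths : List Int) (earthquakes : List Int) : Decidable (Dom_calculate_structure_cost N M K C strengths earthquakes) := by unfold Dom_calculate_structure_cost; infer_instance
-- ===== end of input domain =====

-- B resolves each structure once with a closed form (first round j with quake[j]+K*j > s,
-- counted only if s > K*j) instead of A's M passes mutating the strengths array; A mutates
-- its `strengths` argument in place, B does not — the equivalence proved is about the return value.

-- shared helper: the nested LIS routine is textually identical in Source A and Source B, so both
-- ports use this one transliteration.  bisect.bisect_right (stdlib) is ported by its
-- contract on the sorted list `lis`: the number of elements ≤ num.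
def lisStep (lis : List Int) (num : Int) : List Int :=
  let idx := lis.countP (fun y => decide (y ≤ num))
  if idx = lis.length then lis ++ [num] else lis.set idx num

def lisLen (arr : List Int) : Int :=
  ((arr.foldl lisStep []).length : Int)

-- ===== PORT A =====
-- inner loop `for i in range(N)` mutating strengths and counting destroyed;
-- strengths[i] is in range for every admitted input (Pre_), getD 0 is the total stand-in
def aInnerGo (K quake : Int) (n : Nat) (strs : List Int) (d : Int) (i : Nat) : List Int × Int :=
  if _h : i < n then
    let s := strs.getD i 0
    if s ≤ 0 then aInnerGo K quake n strs d (i+1)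
    else if quake > s then aInnerGo K quake n (strs.set i 0) (d+1) (i+1)
    else
      let s' := s - K
      aInnerGo K quake n (strs.set i (if s' ≤ 0 then 0 else s')) d (i+1)
  else (strs, d)
termination_by n - i

-- body of `for quake in earthquakes`: state = (strengths, destroyed_each_round)
def aRound (K : Int) (n : Nat) (st : List Int × List Int) (quake : Int) : List Int × List Int :=
  let r := aInnerGo K quake n st.1 0 0
  (r.1, st.2 ++ [r.2])

def calculate_structure_cost (N : Int) (M : Int) (K : Int) (C : Int) (strengths : List Int) (earthquakes : List Int) : Int :=
  lisLen (earthquakes.foldl (aRound K N.toNat) (strengths, [])).2 * C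

-- ===== PORT B =====
-- find_hit_round: first j with earthquakes[j] + K*j > s
def bFindGo (K s : Int) (qs : List Int) (j : Nat) : Option Nat :=
  match qs with
  | [] => none
  | q :: rest => if q + K * (j : Int) > s then some j else bFindGo K s rest (j+1)

-- loop body of `for s in strengths[:max(N,0)]`
def bApply (K : Int) (earthquakes : List Int) (counts : List Int) (s : Int) : List Int :=
  if s ≤ 0 then counts
  else
    match bFindGo K s earthquakes 0 with
    | some j => if K * (j : Int) < s then counts.set j (counts.getD j 0 + 1) else counts
    | none => counts

def calculate_structure_cost_alt (N : Int) (M : Int) (K : Int) (C : Int) (strengths : List Int) (earthquakes : List Int) : Int :=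
  let window := PySem.List.slice strengths none (some (max N 0))
  let counts := window.foldl (bApply K earthquakes) (List.replicate earthquakes.length 0)
  lisLen counts * C

-- ===== PRECONDITION & SPEC =====
-- Pre_ excludes exactly the inputs where A raises IndexError: N larger than the list while
-- at least one earthquake round runs (with no rounds the list is never indexed).
def Pre_calculate_structure_cost (N : Int) (M : Int) (K : Int) (C : Int) (strengths : List Int) (earthquakes : List Int) : Prop :=
  N ≤ (strengths.length : Int) ∨ earthquakes = []
instance (N : Int) (M : Int) (K : Int) (C : Int) (strengths : List Int) (earthquakes : List Int) : Decidable (Pre_calculate_structure_cost N M K C strengths earthquakes) := by unfold Pre_calculate_structure_cost; infer_instance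

def pvWitness_calculate_structure_cost : Int × Int × Int × Int × List Int × List Int :=
  (3, 2, 1, 2, [5, 3, 7], [4, 4])

def Spec_calculate_structure_cost (N : Int) (M : Int) (K : Int) (C : Int) (strengths : List Int) (earthquakes : List Int) (out : Int) : Prop := out = calculate_structure_cost_alt N M K C strengths earthquakes
instance (N : Int) (M : Int) (K : Int) (C : Int) (strengths : List Int) (earthquakes : List Int) (out : Int) : Decidable (Spec_calculate_structure_cost N M K C strengths earthquakes out) := by unfold Spec_calculate_structure_cost; infer_instance

-- ===== CLAIM (what is proved, stated in full; the proofs are below) =====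
def Claim_equal_calculate_structure_cost : Prop := ∀ (N : Int) (M : Int) (K : Int) (C : Int) (strengths : List Int) (earthquakes : List Int), Dom_calculate_structure_cost N M K C strengths earthquakes → Pre_calculate_structure_cost N M K C strengths earthquakes → Spec_calculate_structure_cost N M K C strengths earthquakes (calculate_structure_cost N M K C strengths earthquakes)

-- ===== LEMMAS AND PROOFS =====

-- per-element effect of one round (A's inner-loop body on one cell)
def gFun (K q s : Int) : Int :=
  if s ≤ 0 then s else if q > s then 0 else if s - K ≤ 0 then 0 else s - K

-- destroyed indicator of one cell in one round
def cFun (q s : Int) : Int := if 0 < s ∧ s < q then 1 else 0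

-- the per-round destroyed counts of A, window evolving elementwise
def roundsA (K : Int) (w : List Int) : List Int → List Int
  | [] => []
  | q :: qs => (w.map (cFun q)).sum :: roundsA K (w.map (gFun K q)) qs

-- unit vector
def oneAt : Nat → Nat → List Int
  | _, 0 => []
  | 0, n+1 => 1 :: List.replicate n 0
  | j+1, n+1 => 0 :: oneAt j n

theorem getD_append_len (pre : List Int) (x : Int) (rest : List Int) :
    (pre ++ x :: rest).getD pre.length 0 = x := by
  induction pre with
  | nil => rfl
  | cons a t ih => simpa using ih

theorem set_append_len (pre : List Int) (x v : Int) (rest : List Int) :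
    (pre ++ x :: rest).set pre.length v = pre ++ v :: rest := by
  induction pre with
  | nil => rfl
  | cons a t ih => simp [List.set, ih]

theorem aInnerGo_spec (K q : Int) :
    ∀ (m : Nat) (pre suf : List Int) (d : Int), m ≤ suf.length →
      aInnerGo K q (pre.length + m) (pre ++ suf) d pre.length =
        (pre ++ (suf.take m).map (gFun K q) ++ suf.drop m,
         d + ((suf.take m).map (cFun q)).sum) := by
  intro m
  induction m with
  | zero =>
      intro pre suf d _
      rw [aInnerGo]
      simp
  | succ m ih =>
      intro pre suf d hle
      match suf, hle with
      | x :: rest, hle =>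
        have hlt : pre.length < pre.length + (m + 1) := by omega
        have hm : m ≤ rest.length := by simpa using hle
        rw [aInnerGo, dif_pos hlt]
        simp only [getD_append_len]
        by_cases h1 : x ≤ 0
        · have := ih (pre ++ [x]) rest d (by simpa using hm)
          simp only [List.length_append, List.length_cons, List.length_nil] at this
          rw [if_pos h1]
          have e1 : pre ++ x :: rest = (pre ++ [x]) ++ rest := by simp
          have e2 : pre.length + (m + 1) = pre.length + 1 + m := by omega
          rw [e1, e2]
          rw [this]
          simp [gFun, cFun, h1, List.append_assoc]
        · by_cases h2 : q > x
          · rw [if_neg h1, if_pos h2, set_append_len]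
            have := ih (pre ++ [(0:Int)]) rest (d+1) hm
            simp only [List.length_append, List.length_cons, List.length_nil] at this
            have e1 : pre ++ (0:Int) :: rest = (pre ++ [(0:Int)]) ++ rest := by simp
            have e2 : pre.length + (m + 1) = pre.length + 1 + m := by omega
            rw [e1, e2, this]
            have hc : cFun q x = 1 := by simp [cFun]; constructor <;> omega
            simp [gFun, cFun, h1, h2, List.append_assoc]
            omega
          · rw [if_neg h1, if_neg h2, set_append_len]
            set v : Int := if x - K ≤ 0 then 0 else x - K with hv
            have := ih (pre ++ [v]) rest d hm
            simp only [List.length_append, List.length_cons, List.length_nil] at this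
            have e1 : pre ++ v :: rest = (pre ++ [v]) ++ rest := by simp
            have e2 : pre.length + (m + 1) = pre.length + 1 + m := by omega
            rw [e1, e2, this]
            have hg : gFun K q x = v := by simp [gFun, h1, h2, hv]
            have hc : cFun q x = 0 := by simp [cFun]; omega
            simp [hg, hc, List.append_assoc]

theorem aOuter_spec (K : Int) (n : Nat) :
    ∀ (qs strs rounds : List Int), n ≤ strs.length →
      (qs.foldl (aRound K n) (strs, rounds)).2 =
        rounds ++ roundsA K (strs.take n) qs := by
  intro qs
  induction qs with
  | nil => intro strs rounds _; simp [roundsA]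
  | cons q qs ih =>
      intro strs rounds hn
      have hinner := aInnerGo_spec K q n [] strs 0 hn
      simp only [List.nil_append, List.length_nil, Nat.zero_add, zero_add] at hinner
      have hwin : ((strs.take n).map (gFun K q) ++ strs.drop n).take n
          = (strs.take n).map (gFun K q) := by
        apply List.take_left'
        simp [hn]
      have hlen : n ≤ ((strs.take n).map (gFun K q) ++ strs.drop n).length := by
        simp; omega
      calc (List.foldl (aRound K n) (strs, rounds) (q :: qs)).2
          = (List.foldl (aRound K n)
              ((strs.take n).map (gFun K q) ++ strs.drop n,
               rounds ++ [((strs.take n).map (cFun q)).sum]) qs).2 := by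
            simp only [List.foldl_cons, aRound, hinner]
        _ = rounds ++ [((strs.take n).map (cFun q)).sum]
              ++ roundsA K ((strs.take n).map (gFun K q)) qs := by
            rw [ih _ _ hlen, hwin]
        _ = rounds ++ roundsA K (strs.take n) (q :: qs) := by
            simp [roundsA]

theorem roundsA_nil (K : Int) : ∀ qs : List Int, roundsA K [] qs = List.replicate qs.length 0 := by
  intro qs; induction qs with
  | nil => rfl
  | cons q qs ih => simp [roundsA, ih, List.replicate_succ]

theorem roundsA_length (K : Int) : ∀ (qs w : List Int), (roundsA K w qs).length = qs.length := by
  intro qs; induction qs with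
  | nil => intro w; rfl
  | cons q qs ih => intro w; simp [roundsA, ih]

theorem roundsA_nonpos (K : Int) : ∀ (qs : List Int) (s : Int), s ≤ 0 →
    roundsA K [s] qs = List.replicate qs.length 0 := by
  intro qs
  induction qs with
  | nil => intro s _; rfl
  | cons q qs ih =>
      intro s hs
      simp [roundsA, gFun, cFun, hs, List.replicate_succ, ih s hs]

theorem bFindGo_shift (K s : Int) : ∀ (qs : List Int) (j : Nat),
    bFindGo K s qs (j+1) = (bFindGo K (s - K) qs j).map (· + 1) := by
  intro qs
  induction qs with
  | nil => intro j; rfl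
  | cons q rest ih =>
      intro j
      have hcond : (q + K * ((j+1 : Nat) : Int) > s) ↔ (q + K * (j : Int) > s - K) := by
        push_cast; constructor <;> intro h <;> nlinarith [h]
      by_cases h : q + K * ((j : Int)) > s - K
      · rw [bFindGo, bFindGo, if_pos (hcond.mpr h), if_pos h]; rfl
      · rw [bFindGo, bFindGo, if_neg (fun hh => h (hcond.mp hh)), if_neg h, ih]

theorem bFindGo_lt (K s : Int) : ∀ (qs : List Int) (j0 j : Nat),
    bFindGo K s qs j0 = some j → j < j0 + qs.length := by
  intro qs
  induction qs with
  | nil => intro j0 j h; simp [bFindGo] at h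
  | cons q rest ih =>
      intro j0 j h
      rw [bFindGo] at h
      by_cases hc : q + K * ((j0 : Nat) : Int) > s
      · rw [if_pos hc] at h
        simp only [Option.some.injEq] at h
        subst h
        simp only [List.length_cons]
        omega
      · rw [if_neg hc] at h
        have := ih (j0+1) j h
        simp only [List.length_cons]
        omega

theorem roundsA_single (K : Int) : ∀ (qs : List Int) (s : Int), 0 < s →
    roundsA K [s] qs =
      (match bFindGo K s qs 0 with
       | some j => if K * (j : Int) < s then oneAt j qs.length else List.replicate qs.length 0
       | none => List.replicate qs.length 0) := by
  intro qs
  induction qs with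
  | nil => intro s _; rfl
  | cons q rest ih =>
      intro s hs
      have hhead : roundsA K [s] (q :: rest) = cFun q s :: roundsA K [gFun K q s] rest := by
        simp [roundsA]
      rw [hhead]
      by_cases h1 : q > s
      · have hf : bFindGo K s (q :: rest) 0 = some 0 := by
          rw [bFindGo]; simp; omega
        rw [hf]
        have : gFun K q s = 0 := by simp [gFun, h1]; omega
        rw [this, roundsA_nonpos K rest 0 le_rfl]
        have hc : cFun q s = 1 := by simp [cFun]; constructor <;> omega
        simp [hc, oneAt, hs, List.replicate_succ]
      · have hc : cFun q s = 0 := by simp [cFun]; omega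
        have hf : bFindGo K s (q :: rest) 0 =
            (bFindGo K (s - K) rest 0).map (· + 1) := by
          rw [bFindGo, if_neg (by simpa using by omega : ¬ q + K * ((0:Nat):Int) > s)]
          exact bFindGo_shift K s rest 0
        rw [hf, hc]
        by_cases h2 : s - K ≤ 0
        · have hg : gFun K q s = 0 := by simp [gFun, h1, h2]; omega
          rw [hg, roundsA_nonpos K rest 0 le_rfl]
          have hK : s ≤ K := by omega
          cases hfr : bFindGo K (s - K) rest 0 with
          | none => simp [List.replicate_succ]
          | some j' =>
              have hKj : ¬ K * ((j' + 1 : Nat) : Int) < s := by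
                have h0K : 0 < K := by omega
                have : 0 ≤ K * (j' : Int) := mul_nonneg (by omega) (by positivity)
                push_cast
                nlinarith [this]
              simp only [Option.map_some]
              rw [if_neg hKj]
              simp [List.replicate_succ]
        · have hg : gFun K q s = s - K := by
            simp [gFun, h1, h2, show ¬ s ≤ 0 by omega]
          rw [hg, ih (s - K) (by omega)]
          cases hfr : bFindGo K (s - K) rest 0 with
          | none => simp [List.replicate_succ]
          | some j' =>
              have hcond : (K * ((j' + 1 : Nat) : Int) < s) ↔ (K * (j' : Int) < s - K) := by
                push_cast; constructor <;> intro h <;> nlinarith [h]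
              simp only [Option.map_some]
              by_cases h3 : K * (j' : Int) < s - K
              · rw [if_pos h3, if_pos (hcond.mpr h3)]
                rfl
              · rw [if_neg h3, if_neg (fun hh => h3 (hcond.mp hh))]
                simp [List.replicate_succ]

theorem zip_add_replicate : ∀ t : List Int, List.zipWith (· + ·) t (List.replicate t.length 0) = t := by
  intro t; induction t with
  | nil => rfl
  | cons a t ih => simp [List.replicate_succ, ih]

theorem replicate_zip_add : ∀ r : List Int, List.zipWith (· + ·) (List.replicate r.length 0) r = r := by
  intro r; induction r with
  | nil => rfl
  | cons a t ih => simp [List.replicate_succ, ih]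

theorem set_eq_zip_oneAt : ∀ (counts : List Int) (j : Nat), j < counts.length →
    counts.set j (counts.getD j 0 + 1) = List.zipWith (· + ·) counts (oneAt j counts.length) := by
  intro counts
  induction counts with
  | nil => intro j h; simp at h
  | cons a t ih =>
      intro j h
      cases j with
      | zero => simp [oneAt, zip_add_replicate]
      | succ j =>
          have h' : j < t.length := by simpa using h
          simp only [List.getD_cons_succ, List.set_cons_succ]
          rw [ih j h']
          simp [oneAt]

theorem zip_add_assoc : ∀ (a b c : List Int),
    List.zipWith (· + ·) (List.zipWith (· + ·) a b) c =
      List.zipWith (· + ·) a (List.zipWith (· + ·) b c) := by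
  intro a
  induction a with
  | nil => intro b c; rfl
  | cons x a ih =>
      intro b c
      cases b with
      | nil => rfl
      | cons y b =>
          cases c with
          | nil => rfl
          | cons z c => simp [ih, add_assoc]

theorem roundsA_cons (K : Int) : ∀ (qs : List Int) (s : Int) (w : List Int),
    roundsA K (s :: w) qs =
      List.zipWith (· + ·) (roundsA K [s] qs) (roundsA K w qs) := by
  intro qs
  induction qs with
  | nil => intro s w; rfl
  | cons q qs ih =>
      intro s w
      simp [roundsA, ih (gFun K q s) (w.map (gFun K q))]

theorem bApply_spec (K : Int) (qs : List Int) (counts : List Int) (s : Int)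
    (h : counts.length = qs.length) :
    bApply K qs counts s = List.zipWith (· + ·) counts (roundsA K [s] qs) := by
  by_cases hs : s ≤ 0
  · rw [bApply, if_pos hs, roundsA_nonpos K qs s hs, ← h, zip_add_replicate]
  · rw [bApply, if_neg hs, roundsA_single K qs s (by omega)]
    cases hf : bFindGo K s qs 0 with
    | none =>
        simp only []
        rw [← h, zip_add_replicate]
    | some j =>
        have hj : j < counts.length := by
          have := bFindGo_lt K s qs 0 j hf; omega
        simp only []
        by_cases hKj : K * (j : Int) < s
        · simp only [if_pos hKj]
          rw [set_eq_zip_oneAt counts j hj, h]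
        · simp only [if_neg hKj]
          rw [← h]
          exact (zip_add_replicate counts).symm

theorem bApply_length (K : Int) (qs counts : List Int) (s : Int) :
    (bApply K qs counts s).length = counts.length := by
  rw [bApply]
  split
  · rfl
  · rcases bFindGo K s qs 0 with _ | j
    · rfl
    · simp only []
      split <;> simp

theorem bFold_spec (K : Int) (qs : List Int) :
    ∀ (w counts : List Int), counts.length = qs.length →
      w.foldl (bApply K qs) counts = List.zipWith (· + ·) counts (roundsA K w qs) := by
  intro w
  induction w with
  | nil =>
      intro counts h
      rw [List.foldl_nil, roundsA_nil, ← h, zip_add_replicate]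
  | cons s w ih =>
      intro counts h
      rw [List.foldl_cons, ih _ (by rw [bApply_length]; exact h),
        bApply_spec K qs counts s h, zip_add_assoc, ← roundsA_cons]

-- ===== VERDICT (by name: the statement is the Claim_ definition above) =====
theorem calculate_structure_cost_spec : Claim_equal_calculate_structure_cost := by
  intro N M K C strengths earthquakes _hdom hpre
  unfold Spec_calculate_structure_cost
  simp only [calculate_structure_cost, calculate_structure_cost_alt]
  rcases hpre with hN | hq
  · -- N ≤ len(strengths)
    have hn : N.toNat ≤ strengths.length := by omega
    have hmax : (0:Int) ≤ max N 0 := le_max_right _ _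
    have hslice : PySem.List.slice strengths none (some (max N 0))
        = strengths.take N.toNat := by
      rw [PySem.List.slice_to strengths hmax]
      congr 1
      omega
    rw [hslice]
    rw [aOuter_spec K N.toNat earthquakes strengths [] hn]
    rw [bFold_spec K earthquakes (strengths.take N.toNat)
      (List.replicate earthquakes.length 0) (by simp)]
    rw [← roundsA_length K earthquakes (strengths.take N.toNat), replicate_zip_add]
    simp
  · -- no earthquakes
    subst hq
    simp [bFold_spec]
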